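-- pv_equiv track=rewrite | github.com/Doodlez1995/gex_dashboard_crypto | scripts/telegram_levels_bot.py | ordered_exchange_list
-- ===== SOURCE A (Python) =====
-- from typing import Dict, List, Optional, Sequence, Tuple
--
-- def canonical_exchange_name(raw_value: object) -> Optional[str]:
--     text = str(raw_value or "").strip()
--     if not text:
--         return None
--     lower = text.lower()
--     if lower == "deribit":
--         return "Deribit"
--     if lower == "bybit":
--         return "Bybit"
--     if lower == "binance":
--         return "Binance"
--     if lower in {"okx", "okx.com"}:
--         return "OKX"
--     return text
--
-- def ordered_exchange_list(values: Sequence[object]) -> List[str]: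
--     order = ["Deribit", "Bybit", "Binance", "OKX"]
--     seen: List[str] = []
--     for item in values:
--         normalized = canonical_exchange_name(item)
--         if normalized and normalized not in seen:
--             seen.append(normalized)
--     priority = {name: idx for idx, name in enumerate(order)}
--     return sorted(seen, key=lambda name: (priority.get(name, len(priority)), name))
-- ===== SOURCE B (Python) =====
-- from typing import List, Optional, Sequence
--
--
-- def canonical_exchange_name(raw_value: object) -> Optional[str]:
--     text = str(raw_value or "").strip()
--     if not text:
--         return None
--     lower = text.lower()
--     if lower == "deribit":
--         return "Deribit"
--     if lower == "bybit":
--         return "Bybit"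
--     if lower == "binance":
--         return "Binance"
--     if lower in {"okx", "okx.com"}:
--         return "OKX"
--     return text
--
--
-- def ordered_exchange_list(values: Sequence[object]) -> List[str]:
--     order = ["Deribit", "Bybit", "Binance", "OKX"]
--     names = set()
--     for item in values:
--         normalized = canonical_exchange_name(item)
--         if normalized:
--             names.add(normalized)
--     known = [name for name in order if name in names]
--     extras = sorted(name for name in names if name not in order)
--     return known + extras
-- ===== Notes on version B (the rewrite author's own statement) =====
-- stated objective: faster
-- what changed: B collects normalized names into a set in one pass (O(1) dedup instead of A's linear 'not in seen' scan), then builds the result as the fixed priority list filtered by set membership followed by a sorted() of only the unknown names, instead of sorting everything with a (priority, name) tuple key.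
import Mathlib
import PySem

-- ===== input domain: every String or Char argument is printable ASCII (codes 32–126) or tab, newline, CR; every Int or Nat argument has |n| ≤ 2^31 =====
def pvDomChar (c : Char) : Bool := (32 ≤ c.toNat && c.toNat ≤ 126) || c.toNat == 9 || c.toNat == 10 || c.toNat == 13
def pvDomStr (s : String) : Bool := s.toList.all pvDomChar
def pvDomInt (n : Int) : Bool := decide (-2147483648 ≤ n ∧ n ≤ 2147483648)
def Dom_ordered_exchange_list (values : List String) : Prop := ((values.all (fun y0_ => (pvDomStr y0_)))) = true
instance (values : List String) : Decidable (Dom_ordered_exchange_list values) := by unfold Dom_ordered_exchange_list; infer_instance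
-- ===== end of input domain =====

-- B: dedups into a set in one pass (replacing A's quadratic 'not in seen' scan), then returns the
-- fixed priority list filtered by membership followed by a plain sorted() of only the unknown names,
-- instead of A's (priority, name) tuple-key sort of everything (objective: faster; same return value).

-- ===== PORT A =====
-- shared helper: the module's canonical_exchange_name, called by both Pythons
def pvCanon (raw : String) : Option String :=
  let text := PySem.Str.strip (if raw = "" then "" else raw)
  if text = "" then none
  else
    let lower := PySem.Str.lower text
    if lower = "deribit" then some "Deribit"
    else if lower = "bybit" then some "Bybit"
    else if lower = "binance" then some "Binance"
    else if lower = "okx" ∨ lower = "okx.com" then some "OKX"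
    else some text

def ordered_exchange_list (values : List String) : List String :=
  let order : List String := ["Deribit", "Bybit", "Binance", "OKX"]
  let seen : List String := values.foldl (fun seen item =>
    match pvCanon item with
    | none => seen
    | some normalized =>
        if normalized ≠ "" ∧ normalized ∉ seen then seen ++ [normalized] else seen) []
  let priority : PySem.Dict String Int :=
    (List.zip (List.range order.length) order).foldl
      (fun d p => PySem.Dict.insert d p.2 (p.1 : Int)) PySem.Dict.empty
  PySem.List.sorted2 seen
    (fun name => PySem.Dict.getD priority name ((priority.items.length : Nat) : Int))
    (fun name => name) false

-- ===== PORT B =====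
def ordered_exchange_list_alt (values : List String) : List String :=
  let order : List String := ["Deribit", "Bybit", "Binance", "OKX"]
  let names : PySem.Set String := values.foldl (fun s item =>
    match pvCanon item with
    | none => s
    | some normalized => if normalized = "" then s else PySem.Set.add s normalized)
    PySem.Set.empty
  let known := order.filter (fun name => decide (name ∈ names))
  let extras := PySem.List.sorted (names.filter (fun name => decide (name ∉ order))) (fun x => x) false
  known ++ extras

-- ===== PRECONDITION & SPEC =====
def Spec_ordered_exchange_list (values : List String) (out : List String) : Prop := out = ordered_exchange_list_alt values
instance (values : List String) (out : List String) : Decidable (Spec_ordered_exchange_list values out) := by unfold Spec_ordered_exchange_list; infer_instance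

-- ===== CLAIM (what is proved, stated in full; the proofs are below) =====
def Claim_equal_ordered_exchange_list : Prop := ∀ (values : List String), Dom_ordered_exchange_list values → Spec_ordered_exchange_list values (ordered_exchange_list values)

-- ===== LEMMAS AND PROOFS =====

-- A's conditional-append dedup loop and B's set-add loop are the same step function.
theorem pv_step_eq (s : List String) (item : String) :
    (match pvCanon item with
      | none => s
      | some normalized =>
          if normalized ≠ "" ∧ normalized ∉ s then s ++ [normalized] else s) =
    (match pvCanon item with
      | none => s
      | some normalized => if normalized = "" then s else PySem.Set.add s normalized) := by
  cases pvCanon item with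
  | none => rfl
  | some n =>
      by_cases h0 : n = ""
      · simp [h0]
      · by_cases hm : n ∈ s <;>
          simp [h0, hm, PySem.Set.add, PySem.Set.contains]

-- B's fold keeps the accumulator duplicate-free.
theorem pv_names_nodup (values : List String) (s : PySem.Set String) (hs : s.Nodup) :
    (values.foldl (fun s item =>
      match pvCanon item with
      | none => s
      | some normalized => if normalized = "" then s else PySem.Set.add s normalized) s).Nodup := by
  induction values generalizing s with
  | nil => exact hs
  | cons x xs ih =>
      refine ih _ ?_
      rcases h : pvCanon x with _ | n
      · simpa [h] using hs
      · rcases eq_or_ne n "" with h0 | h0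
        · simpa [h, h0] using hs
        · simpa [h, h0] using PySem.Set.nodup_add s n hs

-- sorted2 with keys (k1, id) is sorted with the lexicographic key into Lex (Int × String).
theorem pv_sorted2_lex (xs : List String) (k1 : String → Int) :
    PySem.List.sorted2 xs k1 (fun x => x) false =
    PySem.List.sorted xs (fun x => toLex (k1 x, x)) false := by
  show List.foldl _ [] xs = List.foldl _ [] xs
  have hb : (fun a b : String => decide (k1 a < k1 b) || (!decide (k1 b < k1 a) && decide (a < b))) =
      (fun a b : String => decide (toLex (k1 a, a) < toLex (k1 b, b))) := by
    funext a b
    by_cases h1 : k1 a < k1 b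
    · simp [h1, Prod.Lex.lt_iff]
    · by_cases h2 : k1 b < k1 a
      · have hne : ¬ (k1 a = k1 b) := by omega
        simp [h1, h2, Prod.Lex.lt_iff, hne]
      · have heq : k1 a = k1 b := by omega
        simp [Prod.Lex.lt_iff, heq]
  rw [hb]

-- the key A sorts by, with the priority dict already evaluated
def pvKey (x : String) : Lex (Int × String) :=
  toLex (PySem.Dict.getD (PySem.Dict.mk [("Deribit", (0:Int)), ("Bybit", 1), ("Binance", 2), ("OKX", 3)]) x 4, x)

theorem pv_key_not_in_order (x : String)
    (hx : x ∉ (["Deribit", "Bybit", "Binance", "OKX"] : List String)) :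
    pvKey x = toLex ((4 : Int), x) := by
  simp only [List.mem_cons, List.not_mem_nil, or_false, not_or] at hx
  obtain ⟨h1, h2, h3, h4⟩ := hx
  have e1 : (("Deribit" : String) == x) = false := beq_eq_false_iff_ne.mpr (Ne.symm h1)
  have e2 : (("Bybit" : String) == x) = false := beq_eq_false_iff_ne.mpr (Ne.symm h2)
  have e3 : (("Binance" : String) == x) = false := beq_eq_false_iff_ne.mpr (Ne.symm h3)
  have e4 : (("OKX" : String) == x) = false := beq_eq_false_iff_ne.mpr (Ne.symm h4)
  simp [pvKey, PySem.Dict.getD, PySem.Dict.get?, List.find?, e1, e2, e3, e4]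

theorem pv_key_lt_of_order_mem (a b : String)
    (ha : a ∈ (["Deribit", "Bybit", "Binance", "OKX"] : List String))
    (hb : b ∉ (["Deribit", "Bybit", "Binance", "OKX"] : List String)) :
    pvKey a < pvKey b := by
  rw [pv_key_not_in_order b hb]
  have hlt : (ofLex (pvKey a)).1 < 4 := by
    simp only [List.mem_cons, List.not_mem_nil, or_false] at ha
    rcases ha with rfl | rfl | rfl | rfl <;> decide
  exact Prod.Lex.lt_iff.mpr (Or.inl hlt)

-- the permutation and strict-order facts behind the sorted_eq characterisation
theorem pv_perm (names : List String) (hnd : names.Nodup) :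
    ((["Deribit", "Bybit", "Binance", "OKX"] : List String).filter (fun name => decide (name ∈ names)) ++
      PySem.List.sorted (names.filter (fun name => decide (name ∉ (["Deribit", "Bybit", "Binance", "OKX"] : List String)))) (fun x => x) false).Perm names := by
  have hknown : ((["Deribit", "Bybit", "Binance", "OKX"] : List String).filter (fun name => decide (name ∈ names))).Perm
      (names.filter (fun x => decide (x ∈ (["Deribit", "Bybit", "Binance", "OKX"] : List String)))) := by
    rw [List.perm_ext_iff_of_nodup ((by decide : (["Deribit", "Bybit", "Binance", "OKX"] : List String).Nodup).filter _) (hnd.filter _)]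
    intro a
    simp only [List.mem_filter, decide_eq_true_eq]
    tauto
  have hextras : (PySem.List.sorted (names.filter (fun name => decide (name ∉ (["Deribit", "Bybit", "Binance", "OKX"] : List String)))) (fun x => x) false).Perm
      (names.filter (fun x => !decide (x ∈ (["Deribit", "Bybit", "Binance", "OKX"] : List String)))) := by
    refine (PySem.List.sorted_perm _ _ _).trans ?_
    simp [decide_not]
  exact (hknown.append hextras).trans (List.filter_append_perm _ names)

theorem pv_pairwise (names : List String) (hnd : names.Nodup) :
    ((["Deribit", "Bybit", "Binance", "OKX"] : List String).filter (fun name => decide (name ∈ names)) ++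
      PySem.List.sorted (names.filter (fun name => decide (name ∉ (["Deribit", "Bybit", "Binance", "OKX"] : List String)))) (fun x => x) false).Pairwise
      (fun a b => pvKey a < pvKey b) := by
  rw [List.pairwise_append]
  refine ⟨?_, ?_, ?_⟩
  · exact List.Pairwise.filter _ (by decide :
      (["Deribit", "Bybit", "Binance", "OKX"] : List String).Pairwise (fun a b => pvKey a < pvKey b))
  · have hple : (PySem.List.sorted (names.filter (fun name => decide (name ∉ (["Deribit", "Bybit", "Binance", "OKX"] : List String)))) (fun x => x) false).Pairwise (fun a b : String => a ≤ b) :=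
      PySem.List.sorted_pairwise _ _
    have hnds : (PySem.List.sorted (names.filter (fun name => decide (name ∉ (["Deribit", "Bybit", "Binance", "OKX"] : List String)))) (fun x => x) false).Nodup :=
      (PySem.List.sorted_perm _ _ _).symm.nodup (hnd.filter _)
    refine (hple.and hnds).imp_of_mem ?_
    intro a b ha hb h
    have hna : a ∉ (["Deribit", "Bybit", "Binance", "OKX"] : List String) := by
      have := (PySem.List.mem_sorted _ _ _ _).mp ha
      simpa using (List.mem_filter.mp this).2
    have hnb : b ∉ (["Deribit", "Bybit", "Binance", "OKX"] : List String) := by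
      have := (PySem.List.mem_sorted _ _ _ _).mp hb
      simpa using (List.mem_filter.mp this).2
    rw [pv_key_not_in_order a hna, pv_key_not_in_order b hnb]
    exact Prod.Lex.lt_iff.mpr (Or.inr ⟨rfl, lt_of_le_of_ne h.1 h.2⟩)
  · intro a ha b hb
    have ha' : a ∈ (["Deribit", "Bybit", "Binance", "OKX"] : List String) := List.mem_of_mem_filter ha
    have hb' : b ∉ (["Deribit", "Bybit", "Binance", "OKX"] : List String) := by
      have := (PySem.List.mem_sorted _ _ _ _).mp hb
      simpa using (List.mem_filter.mp this).2
    exact pv_key_lt_of_order_mem a b ha' hb'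

-- the two dedup loops compute the same list
theorem pv_fold_eq (values : List String) :
    values.foldl (fun seen item =>
      match pvCanon item with
      | none => seen
      | some normalized =>
          if normalized ≠ "" ∧ normalized ∉ seen then seen ++ [normalized] else seen) [] =
    values.foldl (fun s item =>
      match pvCanon item with
      | none => s
      | some normalized => if normalized = "" then s else PySem.Set.add s normalized) [] :=
  by refine PySem.List.foldl_congr_mem _ _ _ _ (fun acc x _ => pv_step_eq acc x)

-- main equality: A's result equals B's for every input
set_option maxHeartbeats 1000000 in
theorem pv_main (values : List String) :
    ordered_exchange_list values = ordered_exchange_list_alt values := by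
  simp only [ordered_exchange_list, ordered_exchange_list_alt]
  rw [pv_fold_eq values]
  set names := values.foldl (fun s item =>
    match pvCanon item with
    | none => s
    | some normalized => if normalized = "" then s else PySem.Set.add s normalized) [] with hnames
  have hnd : names.Nodup := pv_names_nodup values [] (by simp)
  rw [pv_sorted2_lex]
  exact PySem.List.sorted_eq_of_perm_of_pairwise_lt _ _ _ (pv_perm names hnd) (pv_pairwise names hnd)

-- ===== VERDICT (by name: the statement is the Claim_ definition above) =====
theorem ordered_exchange_list_spec : Claim_equal_ordered_exchange_list := by
  intro values _
  exact pv_main values
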